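-- pv_equiv track=rewrite | github.com/eliottcassidy2000/math | 04-computation/c6_from_trace.py | matrix_power_trace
-- ===== SOURCE A (Python) =====
-- def matrix_power_trace(T, k):
--     n = len(T)
--     Ak = [[int(i == j) for j in range(n)] for i in range(n)]
--     for _ in range(k):
--         new = [[0]*n for _ in range(n)]
--         for i in range(n):
--             for j in range(n):
--                 for l in range(n):
--                     new[i][j] += Ak[i][l] * T[l][j]
--         Ak = new
--     return sum(Ak[i][i] for i in range(n))
-- ===== SOURCE B (Python) =====
-- def matrix_power_trace(T, k):
--     n = len(T)
--
--     def mul(A, B):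
--         return [[sum(A[i][l] * B[l][j] for l in range(n)) for j in range(n)]
--                 for i in range(n)]
--
--     result = [[int(i == j) for j in range(n)] for i in range(n)]
--     base = T
--     e = k
--     while e > 0:
--         if e % 2 == 1:
--             result = mul(result, base)
--         base = mul(base, base)
--         e //= 2
--     return sum(result[i][i] for i in range(n))
-- ===== Notes on version B (the rewrite author's own statement) =====
-- stated objective: faster
-- what changed: replaces the k successive matrix multiplications with exponentiation by squaring over the binary decomposition of k; intended as faster (O(log k) vs O(k) matrix products), measured 5.72x at the largest size both finished in a timing run
import Mathlib
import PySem

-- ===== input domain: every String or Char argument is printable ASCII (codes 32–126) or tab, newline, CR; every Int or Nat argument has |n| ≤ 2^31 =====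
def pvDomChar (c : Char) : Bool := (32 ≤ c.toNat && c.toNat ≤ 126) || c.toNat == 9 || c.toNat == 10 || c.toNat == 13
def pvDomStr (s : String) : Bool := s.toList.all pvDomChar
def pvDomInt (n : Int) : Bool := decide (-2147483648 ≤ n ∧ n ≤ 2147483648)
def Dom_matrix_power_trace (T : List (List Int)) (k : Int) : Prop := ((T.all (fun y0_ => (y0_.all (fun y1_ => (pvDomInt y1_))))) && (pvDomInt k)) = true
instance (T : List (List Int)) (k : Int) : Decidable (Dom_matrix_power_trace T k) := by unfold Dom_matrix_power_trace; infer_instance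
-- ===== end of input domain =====

-- B computes trace(T^k) by exponentiation by squaring instead of A's k successive products (intended as faster; timing run measured 5.72x at the largest size both finished).

-- ===== PORT A =====
def matrix_power_trace (T : List (List Int)) (k : Int) : Int :=
  let n := T.length
  let Ak0 : List (List Int) :=
    (List.range n).map (fun i => (List.range n).map (fun j => if i = j then (1 : Int) else 0))
  let Ak := (List.range k.toNat).foldl (fun Ak _ =>
    (List.range n).map (fun i => (List.range n).map (fun j =>
      (List.range n).foldl (fun acc l =>
        acc + ((Ak.getD i []).getD l 0) * ((T.getD l []).getD j 0)) 0))) Ak0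
  ((List.range n).map (fun i => ((Ak.getD i []).getD i 0))).sum

-- ===== PORT B =====
-- Source B's helper 'mul' (sum comprehension)
def pvMulB (n : Nat) (A B : List (List Int)) : List (List Int) :=
  (List.range n).map (fun i => (List.range n).map (fun j =>
    ((List.range n).map (fun l => ((A.getD i []).getD l 0) * ((B.getD l []).getD j 0))).sum))

-- Source B's while-loop (binary exponentiation)
def pvLoopB (n : Nat) (result base : List (List Int)) (e : Int) : List (List Int) :=
  if _h : 0 < e then
    pvLoopB n (if PySem.Int.mod e 2 = 1 then pvMulB n result base else result)
      (pvMulB n base base) (PySem.Int.floordiv e 2)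
  else result
termination_by e.toNat
decreasing_by
  rw [PySem.Int.floordiv_eq_ediv_of_pos (by norm_num)]
  omega

def matrix_power_trace_alt (T : List (List Int)) (k : Int) : Int :=
  let n := T.length
  let init : List (List Int) :=
    (List.range n).map (fun i => (List.range n).map (fun j => if i = j then (1 : Int) else 0))
  let r := pvLoopB n init T k
  ((List.range n).map (fun i => ((r.getD i []).getD i 0))).sum

-- ===== PRECONDITION & SPEC =====
-- Pre_ excludes ragged matrices with a row shorter than len(T) when k ≥ 1: there Python A (and B) raise IndexError (for k ≤ 0 no entry is ever read).
def Pre_matrix_power_trace (T : List (List Int)) (k : Int) : Prop :=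
  k ≤ 0 ∨ ∀ row ∈ T, T.length ≤ row.length
instance (T : List (List Int)) (k : Int) : Decidable (Pre_matrix_power_trace T k) := by
  unfold Pre_matrix_power_trace; infer_instance
def pvWitness_matrix_power_trace : List (List Int) × Int := ([[1, 2], [3, 4]], 3)

def Spec_matrix_power_trace (T : List (List Int)) (k : Int) (out : Int) : Prop := out = matrix_power_trace_alt T k
instance (T : List (List Int)) (k : Int) (out : Int) : Decidable (Spec_matrix_power_trace T k out) := by unfold Spec_matrix_power_trace; infer_instance

-- ===== CLAIM (what is proved, stated in full; the proofs are below) =====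
def Claim_equal_matrix_power_trace : Prop := ∀ (T : List (List Int)) (k : Int), Dom_matrix_power_trace T k → Pre_matrix_power_trace T k → Spec_matrix_power_trace T k (matrix_power_trace T k)

-- ===== LEMMAS AND PROOFS =====

def pvToM (n : Nat) (A : List (List Int)) : Matrix (Fin n) (Fin n) Int :=
  fun i j => (A.getD i []).getD j 0

theorem pv_getD_range_map {α : Type} (n : Nat) (f : Nat → α) (d : α) {i : Nat} (h : i < n) :
    ((List.range n).map f).getD i d = f i := by
  rw [List.getD_eq_getElem?_getD]
  simp [h]

theorem pv_sum_range_map (g : Nat → Int) (n : Nat) :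
    ((List.range n).map g).sum = ∑ l : Fin n, g l := by
  rw [Fin.sum_univ_eq_sum_range]
  induction n with
  | zero => simp
  | succ m ih => rw [List.range_succ, List.map_append, List.sum_append, Finset.sum_range_succ, ih]; simp

theorem pv_foldl_add_map (g : Nat → Int) (L : List Nat) (a : Int) :
    L.foldl (fun acc l => acc + g l) a = a + (L.map g).sum := by
  induction L generalizing a with
  | nil => simp
  | cons h t ih => simp [ih, add_assoc]

theorem pv_toM_mulB (n : Nat) (A B : List (List Int)) :
    pvToM n (pvMulB n A B) = pvToM n A * pvToM n B := by
  funext i j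
  show ((pvMulB n A B).getD i []).getD j 0 = _
  unfold pvMulB
  rw [pv_getD_range_map n _ _ i.isLt, pv_getD_range_map n _ _ j.isLt,
    pv_sum_range_map, Matrix.mul_apply]
  rfl

theorem pv_toM_init (n : Nat) :
    pvToM n ((List.range n).map (fun i => (List.range n).map (fun j => if i = j then (1 : Int) else 0))) = 1 := by
  funext i j
  show (((List.range n).map _).getD i []).getD j 0 = _
  rw [pv_getD_range_map n _ _ i.isLt, pv_getD_range_map n _ _ j.isLt, Matrix.one_apply]
  simp [Fin.val_inj]

theorem pv_stepA_eq_mulB (n : Nat) (Ak T : List (List Int)) :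
    ((List.range n).map (fun i => (List.range n).map (fun j =>
      (List.range n).foldl (fun acc l =>
        acc + ((Ak.getD i []).getD l 0) * ((T.getD l []).getD j 0)) 0)))
    = pvMulB n Ak T := by
  unfold pvMulB
  refine List.map_congr_left (fun i _ => ?_)
  refine List.map_congr_left (fun j _ => ?_)
  rw [pv_foldl_add_map]
  simp

theorem pv_foldA (n : Nat) (T init : List (List Int)) (m : Nat) :
    pvToM n ((List.range m).foldl (fun Ak _ => pvMulB n Ak T) init)
      = pvToM n init * (pvToM n T) ^ m := by
  induction m with
  | zero => simp
  | succ p ih =>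
    rw [List.range_succ, List.foldl_append, List.foldl_cons, List.foldl_nil,
      pv_toM_mulB, ih, pow_succ, mul_assoc]

theorem pv_loopB_aux (n : Nat) : ∀ (m : Nat) (e : Int), e.toNat = m → ∀ (r b : List (List Int)),
    pvToM n (pvLoopB n r b e) = pvToM n r * (pvToM n b) ^ e.toNat := by
  intro m
  induction m using Nat.strong_induction_on with
  | _ m ih =>
    intro e hm r b
    rw [pvLoopB]
    by_cases he : 0 < e
    · have hdiv : PySem.Int.floordiv e 2 = e / 2 :=
        PySem.Int.floordiv_eq_ediv_of_pos (by norm_num)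
      have hmod : PySem.Int.mod e 2 = e % 2 :=
        PySem.Int.mod_eq_emod_of_pos (by norm_num)
      have hlt : (PySem.Int.floordiv e 2).toNat < e.toNat := by rw [hdiv]; omega
      simp only [he, dif_pos]
      rw [ih _ (hm ▸ hlt) _ rfl, pv_toM_mulB]
      by_cases hodd : PySem.Int.mod e 2 = 1
      · have hnat : e.toNat = 2 * (PySem.Int.floordiv e 2).toNat + 1 := by
          rw [hdiv]; rw [hmod] at hodd; omega
        rw [if_pos hodd, pv_toM_mulB, hnat]
        rw [pow_succ', ← sq, ← pow_mul, mul_assoc]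
      · have hnat : e.toNat = 2 * (PySem.Int.floordiv e 2).toNat := by
          rw [hdiv]; rw [hmod] at hodd; omega
        rw [if_neg hodd, hnat, ← sq, ← pow_mul]
    · have h0 : e.toNat = 0 := by omega
      simp [he, h0]

theorem pv_loopB (n : Nat) (e : Int) (r b : List (List Int)) :
    pvToM n (pvLoopB n r b e) = pvToM n r * (pvToM n b) ^ e.toNat :=
  pv_loopB_aux n e.toNat e rfl r b

theorem pv_trace_eq (n : Nat) (M N : List (List Int)) (h : pvToM n M = pvToM n N) :
    ((List.range n).map (fun i => ((M.getD i []).getD i 0))).sum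
      = ((List.range n).map (fun i => ((N.getD i []).getD i 0))).sum := by
  refine congrArg List.sum (List.map_congr_left (fun i hi => ?_))
  rw [List.mem_range] at hi
  have := congrFun (congrFun h ⟨i, hi⟩) ⟨i, hi⟩
  exact this

-- ===== VERDICT (by name: the statement is the Claim_ definition above) =====
theorem matrix_power_trace_spec : Claim_equal_matrix_power_trace := by
  intro T k _ _
  show matrix_power_trace T k = matrix_power_trace_alt T k
  simp only [matrix_power_trace, matrix_power_trace_alt]
  set n := T.length with hn
  refine pv_trace_eq n _ _ ?_
  have hstep : (fun (Ak : List (List Int)) (_ : Nat) =>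
      (List.range n).map (fun i => (List.range n).map (fun j =>
        (List.range n).foldl (fun acc l =>
          acc + ((Ak.getD i []).getD l 0) * ((T.getD l []).getD j 0)) 0)))
      = fun Ak _ => pvMulB n Ak T := by
    funext Ak _
    exact pv_stepA_eq_mulB n Ak T
  rw [hstep, pv_foldA, pv_loopB, pv_toM_init]
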